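-- pv_equiv track=rewrite | github.com/jpro6679/kopo_univ | ex3.py | jumsu
-- ===== SOURCE A (Python) =====
-- def jumsu(x):
--     grade = []
--     score = []
--
--     s = x.copy()
--
--     for a in x:
--         if a > 90:
--             grade.append('A')
--         elif a > 80:
--             grade.append('B')
--         elif a > 70:
--             grade.append('C')
--         elif a > 60:
--             grade.append('D')
--         else:
--             grade.append('F')
--
--     x.sort(reverse=True)
--
--     for a in s:
--         score.append(x.index(a) + 1)
--
--     return grade, score
-- ===== SOURCE B (Python) =====
-- def jumsu(x):
--     grade = []
--     score = []
--     for a in x: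
--         grade.append('FDCBA'[(a > 60) + (a > 70) + (a > 80) + (a > 90)])
--         score.append(1 + sum(w > a for w in x))
--     return grade, score
-- ===== Notes on version B (the rewrite author's own statement) =====
-- stated objective: alternative
-- what changed: B never sorts and never scans a sorted list: in one pass it computes each rank directly as 1 + (number of strictly greater elements) -- which equals the first index in A's descending-sorted list -- and each grade by an arithmetic index into 'FDCBA', replacing A's if-chain, in-place sort and per-element .index scans; B also does not mutate its argument.
import Mathlib
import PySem

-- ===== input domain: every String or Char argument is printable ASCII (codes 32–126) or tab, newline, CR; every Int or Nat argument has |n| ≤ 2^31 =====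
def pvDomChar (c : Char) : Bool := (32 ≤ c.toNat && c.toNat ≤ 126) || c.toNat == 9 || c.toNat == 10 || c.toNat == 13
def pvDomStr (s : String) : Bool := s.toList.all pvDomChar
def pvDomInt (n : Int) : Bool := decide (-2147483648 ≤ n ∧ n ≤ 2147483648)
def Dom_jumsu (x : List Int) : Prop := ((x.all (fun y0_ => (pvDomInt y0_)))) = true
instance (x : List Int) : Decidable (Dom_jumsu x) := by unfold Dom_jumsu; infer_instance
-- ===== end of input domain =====

-- B computes each rank directly as 1 + (number of strictly greater elements) instead of A's
-- sort + per-element index scan; equivalence is about the RETURN value only — A sorts its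
-- argument in place, B does not mutate it.

-- ===== PORT A =====
def jumsu (x : List Int) : List String × List Int :=
  let grade : List String := x.foldl (fun g a =>
    g ++ [if a > 90 then "A" else if a > 80 then "B" else if a > 70 then "C"
          else if a > 60 then "D" else "F"]) []
  let s := x
  let xs := PySem.List.sorted x (fun v => v) true
  -- x.index(a): a is always a member of the sorted copy of x, so index? is some; getD 0 is exact here
  let score : List Int := s.foldl (fun sc a =>
    sc ++ [(((PySem.List.index? xs a).getD 0 : Nat) : Int) + 1]) []
  (grade, score)

-- ===== PORT B =====
def jumsu_alt (x : List Int) : List String × List Int :=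
  x.foldl (fun (p : List String × List Int) a =>
    -- 'FDCBA'[i]: the index is always in 0..4, so pyGet? is some and getD "" is exact;
    -- the one-character Python str is the one-character String
    (p.1 ++ [((PySem.Str.pyGet? "FDCBA"
        ((if a > 60 then (1:Int) else 0) + (if a > 70 then 1 else 0)
         + (if a > 80 then 1 else 0) + (if a > 90 then 1 else 0))).map
        (fun c => String.ofList [c])).getD ""],
     p.2 ++ [1 + x.foldl (fun c w => c + (if w > a then (1:Int) else 0)) 0]))
    ([], [])

-- ===== PRECONDITION & SPEC =====
def Spec_jumsu (x : List Int) (out : List String × List Int) : Prop := out = jumsu_alt x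
instance (x : List Int) (out : List String × List Int) : Decidable (Spec_jumsu x out) := by unfold Spec_jumsu; infer_instance

-- ===== CLAIM (what is proved, stated in full; the proofs are below) =====
def Claim_equal_jumsu : Prop := ∀ (x : List Int), Dom_jumsu x → Spec_jumsu x (jumsu x)

-- ===== LEMMAS AND PROOFS =====

-- the two grade computations agree pointwise
theorem grade_eq (a : Int) :
    (if a > 90 then "A" else if a > 80 then "B" else if a > 70 then "C"
     else if a > 60 then "D" else "F")
    = ((PySem.Str.pyGet? "FDCBA"
        ((if a > 60 then (1:Int) else 0) + (if a > 70 then 1 else 0)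
         + (if a > 80 then 1 else 0) + (if a > 90 then 1 else 0))).map
        (fun c => String.ofList [c])).getD "" := by
  by_cases h1 : a > 90
  · have h2 : a > 80 := by omega
    have h3 : a > 70 := by omega
    have h4 : a > 60 := by omega
    simp [h1, h2, h3, h4]
  · by_cases h2 : a > 80
    · have h3 : a > 70 := by omega
      have h4 : a > 60 := by omega
      simp [h1, h2, h3, h4]
    · by_cases h3 : a > 70
      · have h4 : a > 60 := by omega
        simp [h1, h2, h3, h4]
      · by_cases h4 : a > 60
        · simp [h1, h2, h3, h4]
        · simp [h1, h2, h3, h4]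

-- in a nonincreasing list, the first index of a member a is the number of elements > a
theorem index_sorted_desc (l : List Int) (a : Int)
    (hs : l.Pairwise (fun u v => v ≤ u)) (ha : a ∈ l) :
    PySem.List.index? l a = some (l.countP (fun w => a < w)) := by
  induction l with
  | nil => cases ha
  | cons h t ih =>
      rcases List.pairwise_cons.mp hs with ⟨hge, ht⟩
      by_cases hv : h = a
      · subst hv
        rw [PySem.List.index?_cons_self]
        have h0 : ¬ (h < h) := lt_irrefl h
        have ht0 : t.countP (fun w => h < w) = 0 := by
          rw [List.countP_eq_zero]
          intro w hw
          simp only [decide_eq_true_eq]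
          exact not_lt.mpr (hge w hw)
        simp [ht0]
      · have hat : a ∈ t := by
          rcases List.mem_cons.mp ha with h1 | h1
          · exact absurd h1.symm hv
          · exact h1
        have hgt : a < h := lt_of_le_of_ne (hge a hat) (fun e => hv e.symm)
        rw [PySem.List.index?_cons_of_ne t hv, ih ht hat]
        simp [hgt, Nat.add_comm]

-- for a member of x, A's rank (index in the descending sorted list, +1)
-- equals B's rank (1 + number of strictly greater elements)
theorem rank_eq (x : List Int) (a : Int) (ha : a ∈ x) :
    (((PySem.List.index? (PySem.List.sorted x (fun v => v) true) a).getD 0 : Nat) : Int) + 1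
    = 1 + x.foldl (fun c w => c + (if w > a then (1:Int) else 0)) 0 := by
  have hfold : x.foldl (fun c w => c + (if w > a then (1:Int) else 0)) 0
      = ((x.countP (fun w => a < w) : Nat) : Int) := by
    have hfun : (fun (c : Int) w => c + (if w > a then (1:Int) else 0))
        = (fun (c : Int) w => if (decide (a < w)) = true then c + 1 else c) := by
      funext c w
      by_cases hw : a < w <;> simp [hw]
    rw [hfun]
    simpa using PySem.List.foldl_count_if (fun w => decide (a < w)) x 0
  have hmem : a ∈ PySem.List.sorted x (fun v => v) true := by
    rw [PySem.List.mem_sorted]; exact ha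
  have hidx := index_sorted_desc (PySem.List.sorted x (fun v => v) true) a
    (PySem.List.sorted_pairwise_rev x (fun v => v)) hmem
  have hperm : ((PySem.List.sorted x (fun v => v) true).countP (fun w => a < w))
      = x.countP (fun w => a < w) :=
    List.Perm.countP_eq _ (PySem.List.sorted_perm x (fun v => v) true)
  rw [hidx]
  simp [hperm, hfold]
  omega

-- B's single loop over a pair of accumulators produces the pair of the two mapped lists
theorem pair_fold (x : List Int) (f : Int → String) (r : Int → Int) :
    ∀ (g : List String) (s : List Int),
    (x.foldl (fun (p : List String × List Int) a => (p.1 ++ [f a], p.2 ++ [r a])) (g, s))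
    = (g ++ x.map f, s ++ x.map r) := by
  induction x with
  | nil => intro g s; simp
  | cons h t ih => intro g s; simp [List.foldl_cons, ih]

-- ===== VERDICT (by name: the statement is the Claim_ definition above) =====
theorem jumsu_spec : Claim_equal_jumsu := by
  intro x _
  show _ = _
  unfold jumsu jumsu_alt
  rw [pair_fold]
  refine Prod.ext ?_ ?_
  · show x.foldl _ [] = [] ++ x.map _
    rw [PySem.List.foldl_append_singleton_eq_map]
    simpa using List.map_congr_left (fun a _ => grade_eq a)
  · show x.foldl _ [] = [] ++ x.map _
    rw [PySem.List.foldl_append_singleton_eq_map]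
    simpa using List.map_congr_left (fun a ha => rank_eq x a ha)
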